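-- pv_equiv track=rewrite | github.com/barongeng/mxnet | python/mxnet/rnn/io.py | encode_sentences
-- ===== SOURCE A (Python) =====
-- def encode_sentences(sentences, vocab=None, invalid_label=-1, invalid_key='\n', start_label=0):
--     """Encode sentences and (optionally) build a mapping
--     from string tokens to integer indices. Unknown keys
--     will be added to vocabulary.
--
--     Parameters
--     ----------
--     sentences : list of list of str
--         A list of sentences to encode. Each sentence
--         should be a list of string tokens.
--     vocab : None or dict of str -> int
--         Optional input Vocabulary
--     invalid_label : int, default -1
--         Index for invalid token, like <end-of-sentence>
--     invalid_key : str, default '\n'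
--         Key for invalid token. Use '\n' for end
--         of sentence by default.
--     start_label : int
--         lowest index.
--
--     Returns
--     -------
--     result : list of list of int
--         encoded sentences
--     vocab : dict of str -> int
--         result vocabulary
--     """
--     idx = start_label
--     if vocab is None:
--         vocab = {invalid_key: invalid_label}
--         new_vocab = True
--     else:
--         new_vocab = False
--     res = []
--     for sent in sentences:
--         coded = []
--         for word in sent:
--             if word not in vocab:
--                 assert new_vocab, "Unknow token %s"%word
--                 if idx == invalid_label:
--                     idx += 1
--                 vocab[word] = idx
--                 idx += 1
--             coded.append(vocab[word])
--         res.append(coded)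
--
--     return res, vocab
-- ===== SOURCE B (Python) =====
-- def encode_sentences(sentences, vocab=None, invalid_label=-1, invalid_key='\n', start_label=0):
--     # Two-pass decomposition: pass 1 settles the vocabulary, pass 2 encodes.
--     if vocab is None:
--         vocab = {invalid_key: invalid_label}
--         idx = start_label
--         for word in (w for sent in sentences for w in sent):
--             if word not in vocab:
--                 if idx == invalid_label:
--                     idx += 1
--                 vocab[word] = idx
--                 idx += 1
--     else:
--         for sent in sentences:
--             for word in sent:
--                 assert word in vocab, "Unknow token %s" % word
--     res = [[vocab[word] for word in sent] for sent in sentences]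
--     return res, vocab
-- ===== Notes on version B (the rewrite author's own statement) =====
-- stated objective: simpler
-- what changed: Replaces A's single interleaved pass (building the vocabulary while appending codes) by two separate passes: one fold over the flattened token stream that only builds the vocabulary, then a pure nested map-lookup comprehension that encodes every sentence.
import Mathlib
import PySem

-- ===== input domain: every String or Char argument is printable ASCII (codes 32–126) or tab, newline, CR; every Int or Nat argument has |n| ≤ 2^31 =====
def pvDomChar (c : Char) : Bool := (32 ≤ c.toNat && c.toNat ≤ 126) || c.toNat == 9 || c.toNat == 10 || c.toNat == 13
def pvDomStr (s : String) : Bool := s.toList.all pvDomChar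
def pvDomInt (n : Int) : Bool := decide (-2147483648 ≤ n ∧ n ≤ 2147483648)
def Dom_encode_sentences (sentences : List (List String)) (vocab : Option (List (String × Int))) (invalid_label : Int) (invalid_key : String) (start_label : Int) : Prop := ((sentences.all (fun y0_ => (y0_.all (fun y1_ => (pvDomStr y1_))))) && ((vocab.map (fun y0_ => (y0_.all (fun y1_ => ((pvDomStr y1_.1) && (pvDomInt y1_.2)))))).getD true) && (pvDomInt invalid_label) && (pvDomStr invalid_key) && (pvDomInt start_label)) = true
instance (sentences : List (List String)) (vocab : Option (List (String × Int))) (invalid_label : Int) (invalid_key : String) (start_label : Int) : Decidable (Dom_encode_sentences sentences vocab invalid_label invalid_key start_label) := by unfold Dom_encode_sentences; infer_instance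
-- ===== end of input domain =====

-- B replaces A's single interleaved encode-while-building pass by two passes (build the
-- vocabulary first over the flattened token stream, then encode by pure lookup); objective:
-- simpler decomposition, same cost. A mutates a supplied vocab dict in place only on inputs
-- where it raises (excluded by Pre_); inside Pre_ neither program mutates it.

-- ===== PORT A =====
-- inner loop body: 'for word in sent: …' (the 'assert new_vocab' raises AssertionError when
-- new_vocab is false and the word is unknown — exactly those inputs are excluded by Pre_,
-- so the port does not branch on new_vocab)
def pvStepWordA (invalid_label : Int) (st : Int × PySem.Dict String Int × List Int) (word : String) : Int × PySem.Dict String Int × List Int :=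
  let (idx, voc, coded) := st
  if voc.contains word then
    (idx, voc, coded ++ [voc.getD word 0])
  else
    let idx := if idx = invalid_label then idx + 1 else idx
    (idx + 1, voc.insert word idx, coded ++ [(voc.insert word idx).getD word 0])

-- outer loop body: 'for sent in sentences: …'
def pvStepSentA (invalid_label : Int) (st : Int × PySem.Dict String Int × List (List Int)) (sent : List String) : Int × PySem.Dict String Int × List (List Int) :=
  let (idx, voc, res) := st
  let (idx', voc', coded) := sent.foldl (pvStepWordA invalid_label) (idx, voc, [])
  (idx', voc', res ++ [coded])

def encode_sentences (sentences : List (List String)) (vocab : Option (List (String × Int))) (invalid_label : Int) (invalid_key : String) (start_label : Int) : List (List Int) × (List (String × Int)) :=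
  let voc0 : PySem.Dict String Int :=
    match vocab with
    | none => PySem.Dict.empty.insert invalid_key invalid_label
    | some v => PySem.Dict.ofList v
  let (_, voc, res) := sentences.foldl (pvStepSentA invalid_label) (start_label, voc0, [])
  (res, voc.items)

-- ===== PORT B =====
-- pass 1 loop body: add one token of the flattened stream to the vocabulary
def pvAddWordB (invalid_label : Int) (st : PySem.Dict String Int × Int) (word : String) : PySem.Dict String Int × Int :=
  let (voc, idx) := st
  if voc.contains word then (voc, idx)
  else
    let idx := if idx = invalid_label then idx + 1 else idx
    (voc.insert word idx, idx + 1)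

def encode_sentences_alt (sentences : List (List String)) (vocab : Option (List (String × Int))) (invalid_label : Int) (invalid_key : String) (start_label : Int) : List (List Int) × (List (String × Int)) :=
  let voc : PySem.Dict String Int :=
    match vocab with
    | none => ((sentences.flatMap id).foldl (pvAddWordB invalid_label) (PySem.Dict.empty.insert invalid_key invalid_label, start_label)).1
    | some v => PySem.Dict.ofList v
      -- B's else-branch only asserts membership (AssertionError on unknown tokens, outside Pre_)
  (sentences.map (fun sent => sent.map (fun w => voc.getD w 0)), voc.items)

-- ===== PRECONDITION & SPEC =====
-- Pre_ excludes exactly the inputs where A raises AssertionError: a supplied vocab together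
-- with a token not among its keys (B raises the same AssertionError there).
def Pre_encode_sentences (sentences : List (List String)) (vocab : Option (List (String × Int))) (invalid_label : Int) (invalid_key : String) (start_label : Int) : Prop :=
  (vocab.all (fun v => sentences.all (fun sent => sent.all (fun w => (PySem.Dict.ofList v).contains w)))) = true
instance (sentences : List (List String)) (vocab : Option (List (String × Int))) (invalid_label : Int) (invalid_key : String) (start_label : Int) : Decidable (Pre_encode_sentences sentences vocab invalid_label invalid_key start_label) := by unfold Pre_encode_sentences; infer_instance

def pvWitness_encode_sentences : List (List String) × (Option (List (String × Int))) × Int × String × Int :=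
  ([["a", "b"], ["b", "a", "c"]], none, -1, "\n", 0)

def Spec_encode_sentences (sentences : List (List String)) (vocab : Option (List (String × Int))) (invalid_label : Int) (invalid_key : String) (start_label : Int) (out : List (List Int) × (List (String × Int))) : Prop := out = encode_sentences_alt sentences vocab invalid_label invalid_key start_label
instance (sentences : List (List String)) (vocab : Option (List (String × Int))) (invalid_label : Int) (invalid_key : String) (start_label : Int) (out : List (List Int) × (List (String × Int))) : Decidable (Spec_encode_sentences sentences vocab invalid_label invalid_key start_label out) := by unfold Spec_encode_sentences; infer_instance

-- ===== CLAIM (what is proved, stated in full; the proofs are below) =====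
def Claim_equal_encode_sentences : Prop := ∀ (sentences : List (List String)) (vocab : Option (List (String × Int))) (invalid_label : Int) (invalid_key : String) (start_label : Int), Dom_encode_sentences sentences vocab invalid_label invalid_key start_label → Pre_encode_sentences sentences vocab invalid_label invalid_key start_label → Spec_encode_sentences sentences vocab invalid_label invalid_key start_label (encode_sentences sentences vocab invalid_label invalid_key start_label)

-- ===== LEMMAS AND PROOFS =====

-- once a key has a value, pvAddWordB never changes it
theorem pvAdd_mono (il : Int) (st : PySem.Dict String Int × Int) (w k : String) (x : Int)
    (h : st.1.get? k = some x) : ((pvAddWordB il st w).1).get? k = some x := by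
  obtain ⟨voc, idx⟩ := st
  simp only [pvAddWordB]
  by_cases hc : voc.contains w
  · simpa [hc] using h
  · have hk : k ≠ w := by
      intro he; subst he
      rw [PySem.Dict.contains_eq_isSome_get?, h] at hc
      simp at hc
    simp only [hc, if_false, Bool.false_eq_true]
    rw [PySem.Dict.get?_insert_of_ne _ _ hk]
    exact h

theorem pvAdd_fold_mono (il : Int) (ws : List String) (st : PySem.Dict String Int × Int)
    (k : String) (x : Int) (h : st.1.get? k = some x) :
    ((ws.foldl (pvAddWordB il) st).1).get? k = some x := by
  induction ws generalizing st with
  | nil => exact h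
  | cons w ws ih => exact ih _ (pvAdd_mono il st w k x h)

-- after one step the processed word has a value
theorem pvAdd_step_some (il : Int) (st : PySem.Dict String Int × Int) (w : String) :
    ∃ x, ((pvAddWordB il st w).1).get? w = some x := by
  obtain ⟨voc, idx⟩ := st
  by_cases hc : voc.contains w = true
  · have hs : (voc.get? w).isSome := by rw [← PySem.Dict.contains_eq_isSome_get?]; exact hc
    obtain ⟨x, hx⟩ := Option.isSome_iff_exists.mp hs
    exact ⟨x, by simp [pvAddWordB, hc, hx]⟩
  · exact ⟨if idx = il then idx + 1 else idx, by simp [pvAddWordB, hc, PySem.Dict.get?_insert_self]⟩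

-- every processed word has a value after the fold
theorem pvAdd_fold_mem_some (il : Int) (ws : List String) (st : PySem.Dict String Int × Int)
    (w : String) (hw : w ∈ ws) : ∃ x, ((ws.foldl (pvAddWordB il) st).1).get? w = some x := by
  induction ws generalizing st with
  | nil => cases hw
  | cons u us ih =>
    rcases List.mem_cons.mp hw with he | hm
    · subst he
      obtain ⟨x, hx⟩ := pvAdd_step_some il st w
      exact ⟨x, pvAdd_fold_mono il us _ w x hx⟩
    · exact ih _ hm

-- A's word step is B's vocabulary step plus the appended code
theorem stepA_eq (il : Int) (idx : Int) (voc : PySem.Dict String Int) (coded : List Int) (w : String) :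
    pvStepWordA il (idx, voc, coded) w =
      ((pvAddWordB il (voc, idx) w).2, (pvAddWordB il (voc, idx) w).1,
        coded ++ [((pvAddWordB il (voc, idx) w).1).getD w 0]) := by
  simp only [pvStepWordA, pvAddWordB]
  by_cases hc : voc.contains w <;> simp [hc]

-- inner loop characterisation
theorem innerA (il : Int) (ws : List String) (idx : Int) (voc : PySem.Dict String Int) (coded : List Int) :
    ws.foldl (pvStepWordA il) (idx, voc, coded) =
      ((ws.foldl (pvAddWordB il) (voc, idx)).2, (ws.foldl (pvAddWordB il) (voc, idx)).1,
        coded ++ ws.map (fun w => ((ws.foldl (pvAddWordB il) (voc, idx)).1).getD w 0)) := by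
  induction ws generalizing idx voc coded with
  | nil => simp
  | cons w ws ih =>
    simp only [List.foldl_cons, List.map_cons]
    rw [stepA_eq, ih]
    obtain ⟨x, hx⟩ := pvAdd_step_some il (voc, idx) w
    have hfx := pvAdd_fold_mono il ws (pvAddWordB il (voc, idx) w) w x hx
    simp [PySem.Dict.getD_of_get?_eq_some _ 0 hx, PySem.Dict.getD_of_get?_eq_some _ 0 hfx]

-- outer loop characterisation: A's whole fold is B's flattened vocabulary fold plus pure lookups
theorem outerA (il : Int) (ss : List (List String)) (idx : Int) (voc : PySem.Dict String Int)
    (res : List (List Int)) :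
    ss.foldl (pvStepSentA il) (idx, voc, res) =
      (((ss.flatMap id).foldl (pvAddWordB il) (voc, idx)).2,
        ((ss.flatMap id).foldl (pvAddWordB il) (voc, idx)).1,
        res ++ ss.map (fun s => s.map (fun w => (((ss.flatMap id).foldl (pvAddWordB il) (voc, idx)).1).getD w 0))) := by
  induction ss generalizing idx voc res with
  | nil => simp
  | cons s ss ih =>
    simp only [List.foldl_cons, List.map_cons, List.flatMap_cons, id_eq, List.foldl_append]
    simp only [pvStepSentA, innerA]
    rw [ih]
    congr 1
    have hmap : ∀ w ∈ s,
        ((s.foldl (pvAddWordB il) (voc, idx)).1).getD w 0 =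
        (((ss.flatMap id).foldl (pvAddWordB il) (s.foldl (pvAddWordB il) (voc, idx))).1).getD w 0 := by
      intro w hw
      obtain ⟨x, hx⟩ := pvAdd_fold_mem_some il s (voc, idx) w hw
      have hfx := pvAdd_fold_mono il (ss.flatMap id) _ w x hx
      rw [PySem.Dict.getD_of_get?_eq_some _ _ hx, PySem.Dict.getD_of_get?_eq_some _ _ hfx]
    simp [List.map_congr_left hmap]

-- when every word is already a key, the vocabulary fold is the identity
theorem pvAdd_fold_id (il : Int) (ws : List String) (voc : PySem.Dict String Int) (idx : Int)
    (h : ∀ w ∈ ws, voc.contains w = true) :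
    ws.foldl (pvAddWordB il) (voc, idx) = (voc, idx) := by
  induction ws with
  | nil => rfl
  | cons w ws ih =>
    have hw := h w (List.mem_cons_self ..)
    simp only [List.foldl_cons, pvAddWordB, hw, if_true]
    exact ih (fun u hu => h u (List.mem_cons_of_mem _ hu))

-- ===== VERDICT (by name: the statement is the Claim_ definition above) =====
theorem encode_sentences_spec : Claim_equal_encode_sentences := by
  intro sentences vocab il ik sl _hdom hpre
  unfold Spec_encode_sentences encode_sentences encode_sentences_alt
  cases vocab with
  | none =>
    simp only
    rw [outerA]
    simp
  | some v =>
    simp only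
    rw [outerA]
    have hall : ∀ w ∈ sentences.flatMap id, (PySem.Dict.ofList v).contains w = true := by
      intro w hw
      obtain ⟨s, hs, hws⟩ := List.mem_flatMap.mp hw
      unfold Pre_encode_sentences at hpre
      simp only [Option.all, List.all_eq_true] at hpre
      exact hpre s hs w (by simpa using hws)
    rw [pvAdd_fold_id il _ _ _ hall]
    rfl
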